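-- pv_equiv track=rewrite | github.com/raitk3/Python | tk2/exam.py | max_duplicate
-- ===== SOURCE A (Python) =====
-- def max_duplicate(nums):
--     """
--     Return the largest element which has at least one duplicate.
--
--     If no element has duplicate element (an element with the same value), return None.
--
--     max_duplicate([1, 2, 3]) => None
--     max_duplicate([1, 2, 2]) => 2
--     max_duplicate([1, 2, 2, 1, 1]) => 2
--
--     :param nums: List of integers
--     :return: Maximum element with duplicate. None if no duplicate found.
--     """
--     check_list = []
--     new_list = []
--     for el in nums:
--         if el in check_list:
--             new_list.append(el)
--         else:
--             check_list.append(el)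
--
--     if len(new_list) == 0:
--         return None
--     else:
--         return max(new_list)
-- ===== SOURCE B (Python) =====
-- def max_duplicate(nums):
--     s = sorted(nums)
--     best = None
--     for i in range(1, len(s)):
--         if s[i] == s[i - 1]:
--             best = s[i]
--     return best
-- ===== Notes on version B (the rewrite author's own statement) =====
-- stated objective: faster
-- what changed: Replaces the quadratic membership-scan over two growing lists by sorting a copy and taking the value of the last adjacent-equal pair, which is the largest duplicated value.
import Mathlib
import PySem

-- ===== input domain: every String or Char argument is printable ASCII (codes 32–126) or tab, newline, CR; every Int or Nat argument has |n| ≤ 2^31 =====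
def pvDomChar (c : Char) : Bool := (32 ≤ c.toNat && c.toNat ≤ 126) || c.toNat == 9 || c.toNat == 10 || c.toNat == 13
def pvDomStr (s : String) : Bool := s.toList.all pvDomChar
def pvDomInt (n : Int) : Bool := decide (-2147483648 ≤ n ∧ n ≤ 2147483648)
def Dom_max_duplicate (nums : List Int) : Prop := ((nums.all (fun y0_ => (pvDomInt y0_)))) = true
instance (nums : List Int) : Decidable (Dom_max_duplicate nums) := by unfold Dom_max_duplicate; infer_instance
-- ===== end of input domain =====

-- B sorts a copy of the list and returns the value of the last adjacent-equal pair
-- (the largest duplicated value), replacing A's quadratic membership scans: objective faster.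


-- ===== PORT A =====
def max_duplicate (nums : List Int) : Option Int :=
  let p := nums.foldl
    (fun (st : List Int × List Int) el =>
      if el ∈ st.1 then (st.1, st.2 ++ [el]) else (st.1 ++ [el], st.2))
    ([], [])
  if p.2.length = 0 then none else PySem.List.max? p.2 (fun x => x)

-- ===== PORT B =====
-- the 'for i in range(1, len(s))' loop over adjacent pairs s[i-1], s[i]
def lastAdjDup : List Int → Option Int → Option Int
  | a :: b :: rest, best => lastAdjDup (b :: rest) (if b = a then some b else best)
  | _, best => best

def max_duplicate_alt (nums : List Int) : Option Int :=
  lastAdjDup (PySem.List.sorted nums (fun x => x) false) none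

-- ===== PRECONDITION & SPEC =====
def Spec_max_duplicate (nums : List Int) (out : Option Int) : Prop := out = max_duplicate_alt nums
instance (nums : List Int) (out : Option Int) : Decidable (Spec_max_duplicate nums out) := by unfold Spec_max_duplicate; infer_instance

-- ===== CLAIM (what is proved, stated in full; the proofs are below) =====
def Claim_equal_max_duplicate : Prop := ∀ (nums : List Int), Dom_max_duplicate nums → Spec_max_duplicate nums (max_duplicate nums)

-- ===== LEMMAS AND PROOFS =====

-- characterisation of "the largest value occurring at least twice, else none"
def CharAns (xs : List Int) : Option Int → Prop
  | none => ∀ a : Int, xs.count a < 2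
  | some m => 2 ≤ xs.count m ∧ ∀ b : Int, 2 ≤ xs.count b → b ≤ m

theorem charAns_unique (xs : List Int) (o₁ o₂ : Option Int)
    (h₁ : CharAns xs o₁) (h₂ : CharAns xs o₂) : o₁ = o₂ := by
  cases o₁ with
  | none =>
    cases o₂ with
    | none => rfl
    | some m => exact absurd h₂.1 (by have := h₁ m; omega)
  | some m =>
    cases o₂ with
    | none => exact absurd h₁.1 (by have := h₂ m; omega)
    | some m' =>
      have := h₁.2 m' h₂.1
      have := h₂.2 m h₁.1
      simp only [Option.some.injEq]
      omega

-- ----- A side -----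

theorem loopA_mem (l : List Int) : ∀ (seen check new : List Int),
    (∀ a : Int, a ∈ check ↔ a ∈ seen) →
    (∀ a : Int, a ∈ new ↔ 2 ≤ seen.count a) →
    ∀ a : Int,
      a ∈ (l.foldl
        (fun (st : List Int × List Int) el =>
          if el ∈ st.1 then (st.1, st.2 ++ [el]) else (st.1 ++ [el], st.2))
        (check, new)).2
      ↔ 2 ≤ (seen ++ l).count a := by
  induction l with
  | nil => intro seen check new h1 h2 a; simpa using h2 a
  | cons el rest ih =>
    intro seen check new h1 h2 a
    simp only [List.foldl_cons]
    by_cases hel : el ∈ check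
    · have hseen : el ∈ seen := (h1 el).1 hel
      rw [if_pos hel]
      have := ih (seen ++ [el]) check (new ++ [el])
        (by intro a; rw [h1 a]; simp; rintro rfl; exact hseen)
        (by
          intro a
          by_cases ha : a = el
          · subst ha
            have : 1 ≤ seen.count a := List.count_pos_iff.2 hseen
            simp [List.count_append]
            omega
          · simp [List.count_append, ha, Ne.symm ha, h2 a])
        a
      rw [this]
      simp [List.count_append, List.count_cons]
    · have hseen : el ∉ seen := fun h => hel ((h1 el).2 h)
      rw [if_neg hel]
      have := ih (seen ++ [el]) (check ++ [el]) new
        (by intro a; simp [h1 a])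
        (by
          intro a
          by_cases ha : a = el
          · subst ha
            have h0 : seen.count a = 0 := List.count_eq_zero.2 hseen
            simp [h2 a, List.count_append, h0]
          · simp [List.count_append, h2 a, Ne.symm ha])
        a
      rw [this]
      simp [List.count_append, List.count_cons]

theorem charAns_A (nums : List Int) : CharAns nums (max_duplicate nums) := by
  unfold max_duplicate
  have hmem := loopA_mem nums [] [] []
    (by intro a; simp) (by intro a; simp) 
  simp only [List.nil_append] at hmem
  set p := nums.foldl
    (fun (st : List Int × List Int) el =>
      if el ∈ st.1 then (st.1, st.2 ++ [el]) else (st.1 ++ [el], st.2))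
    ([], []) with hp
  by_cases hlen : p.2.length = 0
  · rw [if_pos hlen]
    intro a
    have : a ∉ p.2 := by
      have : p.2 = [] := List.length_eq_zero_iff.1 hlen
      simp [this]
    have := (hmem a).not.1 this
    omega
  · rw [if_neg hlen]
    have hne : p.2 ≠ [] := fun h => hlen (by simp [h])
    obtain ⟨m, hm⟩ : ∃ m, PySem.List.max? p.2 (fun x => x) = some m := by
      cases hq : PySem.List.max? p.2 (fun x => x) with
      | none => exact absurd ((PySem.List.max?_eq_none_iff p.2 (fun x => x)).1 hq) hne
      | some m => exact ⟨m, rfl⟩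
    rw [hm]
    constructor
    · exact (hmem m).1 (PySem.List.max?_mem hm)
    · intro b hb
      exact PySem.List.max?_isMax hm b ((hmem b).2 hb)

-- ----- B side -----

theorem lastAdjDup_best (s : List Int) : ∀ best : Option Int,
    lastAdjDup s best =
      match lastAdjDup s none with
      | some m => some m
      | none => best := by
  induction s with
  | nil => intro best; simp [lastAdjDup]
  | cons a t ih =>
    intro best
    cases t with
    | nil => simp [lastAdjDup]
    | cons b rest =>
      simp only [lastAdjDup]
      rw [ih (if b = a then some b else best), ih (if b = a then some b else none)]
      cases h : lastAdjDup (b :: rest) none <;> by_cases hba : b = a <;> simp [hba]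

theorem charAns_sorted (s : List Int) (hs : s.Pairwise (· ≤ ·)) :
    CharAns s (lastAdjDup s none) := by
  induction s with
  | nil => intro a; simp
  | cons a t ih =>
    cases t with
    | nil =>
      intro c
      simp [List.count_cons, List.count_nil]
      split <;> omega
    | cons b rest =>
      have hab : a ≤ b := (List.pairwise_cons.1 hs).1 b (by simp)
      have hatail : ∀ x ∈ b :: rest, a ≤ x := (List.pairwise_cons.1 hs).1
      have htail : (b :: rest).Pairwise (· ≤ ·) := (List.pairwise_cons.1 hs).2
      have ihr := ih htail
      show CharAns (a :: b :: rest) (lastAdjDup (a :: b :: rest) none)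
      simp only [lastAdjDup]
      rw [lastAdjDup_best]
      cases hL : lastAdjDup (b :: rest) none with
      | some m =>
        rw [hL] at ihr
        have hmc : 2 ≤ (b :: rest).count m := ihr.1
        have hmmem : m ∈ b :: rest := List.count_pos_iff.1 (by omega)
        have ham : a ≤ m := hatail m hmmem
        refine ⟨?_, ?_⟩
        · rw [List.count_cons]; omega
        · intro c hc
          by_cases hac : a = c
          · exact hac ▸ ham
          · refine ihr.2 c ?_
            rw [List.count_cons] at hc
            split at hc
            · rename_i hq; simp only [beq_iff_eq] at hq; omega
            · omega
      | none =>
        rw [hL] at ihr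
        by_cases hba : b = a
        · subst hba
          rw [if_pos rfl]
          refine ⟨?_, ?_⟩
          · rw [List.count_cons]; simp
          · intro c hc
            by_cases hbc : b = c
            · exact hbc ▸ le_refl b
            · exfalso
              have := ihr c
              rw [List.count_cons] at hc
              split at hc
              · rename_i hq; simp only [beq_iff_eq] at hq; omega
              · omega
        · rw [if_neg hba]
          intro c
          rw [List.count_cons]
          by_cases hac : a = c
          · have hcnotin : c ∉ b :: rest := by
              intro hin
              rcases List.mem_cons.1 hin with hcb | hcr
              · exact hba ((hac.trans hcb).symm)
              · have hb_le : b ≤ c := (List.pairwise_cons.1 htail).1 c hcr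
                have hc_le : c ≤ b := hac ▸ hab
                exact hba ((le_antisymm hb_le hc_le).trans hac.symm)
            have h0 : (b :: rest).count c = 0 := List.count_eq_zero.2 hcnotin
            simp [h0, hac]
          · have := ihr c
            split
            · rename_i hq; simp only [beq_iff_eq] at hq; omega
            · omega

theorem charAns_B (nums : List Int) : CharAns nums (max_duplicate_alt nums) := by
  unfold max_duplicate_alt
  have hperm : (PySem.List.sorted nums (fun x => x) false).Perm nums :=
    PySem.List.sorted_perm nums (fun x => x) false
  have hpw : (PySem.List.sorted nums (fun x => x) false).Pairwise (fun a b => a ≤ b) := by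
    have := PySem.List.sorted_pairwise (xs := nums) (key := fun x => x)
    simpa using this
  have h := charAns_sorted _ hpw
  cases hL : lastAdjDup (PySem.List.sorted nums (fun x => x) false) none with
  | none =>
    rw [hL] at h
    intro c
    rw [← hperm.count_eq]
    exact h c
  | some m =>
    rw [hL] at h
    exact ⟨by rw [← hperm.count_eq]; exact h.1,
      fun b hb => h.2 b (by rw [hperm.count_eq]; exact hb)⟩

-- ===== VERDICT (by name: the statement is the Claim_ definition above) =====
theorem max_duplicate_spec : Claim_equal_max_duplicate := by
  intro nums _
  exact charAns_unique nums _ _ (charAns_A nums) (charAns_B nums)
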